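-- pv_equiv track=rewrite | github.com/Seojeil/Algorithm_Practice | python/031-040/033 - 문자열 나누기.py | solution
-- ===== SOURCE A (Python) =====
-- def solution(s):
--     answer = 0
--
--     while s:
--         word = s[0]
--         count = 0
--         len_word = 0
--
--         for char in s:
--             if char == word:
--                 count += 1
--             else:
--                 count -= 1
--
--             len_word += 1
--
--             if count == 0:
--                 s = s[len_word:]
--                 answer += 1
--                 break
--
--             if len_word >= len(s):
--                 s = None
--                 answer += 1
--                 break
--
--     return answer
-- ===== SOURCE B (Python) =====
-- def solution(s):
--     answer = 0
--     count = 0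
--     head = ''
--     for ch in s:
--         if count == 0:
--             head = ch
--             answer += 1
--             count = 1
--         elif ch == head:
--             count += 1
--         else:
--             count -= 1
--     return answer
-- ===== Notes on version B (the rewrite author's own statement) =====
-- stated objective: faster
-- what changed: Replaces the while-loop that repeatedly re-slices the string (quadratic) with a single left-to-right pass maintaining a balance counter, incrementing the answer each time a new block starts at balance zero.
import Mathlib
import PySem

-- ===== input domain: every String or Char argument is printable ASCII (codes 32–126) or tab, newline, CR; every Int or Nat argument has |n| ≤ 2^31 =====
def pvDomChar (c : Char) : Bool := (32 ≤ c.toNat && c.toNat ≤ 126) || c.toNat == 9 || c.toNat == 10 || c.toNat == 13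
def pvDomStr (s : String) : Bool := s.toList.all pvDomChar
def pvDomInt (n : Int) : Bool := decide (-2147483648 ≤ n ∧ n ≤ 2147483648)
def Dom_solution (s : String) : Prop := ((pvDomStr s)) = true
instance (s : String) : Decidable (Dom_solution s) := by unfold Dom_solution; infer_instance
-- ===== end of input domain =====

-- B replaces A's while-loop over repeatedly re-sliced strings by one linear pass with a balance counter (faster).

-- ===== PORT A =====
-- A's inner `for` loop over the current s, carrying count and len_word (total = len(s)).
-- Returns `some rest` when count hits 0 (rest = s[len_word:], i.e. what follows the
-- len_word consumed characters) and `none` when len_word >= len(s) fires (s = None).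
-- The `[]` case is the for-loop exhausting without a break: unreachable, since the
-- len_word >= len(s) test fires at the last character; we return none there.
def innerA (w : Char) (l : List Char) (count lenw total : Int) : Option (List Char) :=
  match l with
  | [] => none
  | c :: tl =>
    if (if c = w then count + 1 else count - 1) = 0 then some tl
    else if lenw + 1 ≥ total then none
    else innerA w tl (if c = w then count + 1 else count - 1) (lenw + 1) total

-- termination lemma for goA (cited by its decreasing_by)
theorem innerA_some_lt : ∀ (l : List Char) (w : Char) (count lenw total : Int) (r : List Char),
    innerA w l count lenw total = some r → r.length < l.length := by
  intro l
  induction l with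
  | nil => intro w count lenw total r h; simp [innerA] at h
  | cons c tl ih =>
    intro w count lenw total r h
    simp only [innerA] at h
    split_ifs at h
    all_goals first
      | (rw [Option.some_inj] at h; subst h; simp)
      | (exact absurd h (by simp))
      | (exact Nat.lt_trans (ih _ _ _ _ _ h) (by simp))

-- A's outer `while s:` loop (word = s[0], answer accumulated as 1 + …)
def goA : List Char → Int
  | [] => 0
  | c :: tl =>
    match h : innerA c (c :: tl) 0 0 ((c :: tl).length : Int) with
    | some r => 1 + goA r
    | none => 1
termination_by l => l.length
decreasing_by exact innerA_some_lt _ _ _ _ _ _ h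

def solution (s : String) : Int := goA s.toList

-- ===== PORT B =====
-- Source B's single for-loop carried as state (head, count, answer); the initial head
-- value is never compared because the count = 0 branch resets it first.
def goB : List Char → Char → Int → Int → Int
  | [], _, _, ans => ans
  | c :: tl, w, count, ans =>
    if count = 0 then goB tl c 1 (ans + 1)
    else if c = w then goB tl w (count + 1) ans
    else goB tl w (count - 1) ans

def solution_alt (s : String) : Int := goB s.toList ' ' 0 0

-- ===== PRECONDITION & SPEC =====
def Spec_solution (s : String) (out : Int) : Prop := out = solution_alt s
instance (s : String) (out : Int) : Decidable (Spec_solution s out) := by unfold Spec_solution; infer_instance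

-- ===== CLAIM (what is proved, stated in full; the proofs are below) =====
def Claim_equal_solution : Prop := ∀ (s : String), Dom_solution s → Spec_solution s (solution s)

-- ===== LEMMAS AND PROOFS =====

-- the accumulated answer shifts out of goB
theorem goB_shift : ∀ (l : List Char) (w : Char) (count ans : Int),
    goB l w count ans = ans + goB l w count 0 := by
  intro l
  induction l with
  | nil => intro w count ans; simp [goB]
  | cons c tl ih =>
    intro w count ans
    simp only [goB]
    split_ifs with h1 h2
    · rw [ih c 1 (ans + 1), ih c 1 (0 + 1)]; ring
    · exact ih _ _ _
    · exact ih _ _ _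

-- with count = 0 the head value is irrelevant (it gets reset at the next character)
theorem goB_head0 : ∀ (l : List Char) (w w' : Char) (a : Int),
    goB l w 0 a = goB l w' 0 a := by
  intro l w w' a
  cases l <;> simp [goB]

-- inside a block (count ≠ 0), goB follows A's inner loop step for step
theorem goB_inner : ∀ (l : List Char) (w : Char) (count ans lenw : Int),
    count ≠ 0 →
    goB l w count ans =
      match innerA w l count lenw (lenw + l.length) with
      | some r => goB r w 0 ans
      | none => ans := by
  intro l
  induction l with
  | nil => intro w count ans lenw hc; simp [innerA, goB]
  | cons c tl ih =>
    intro w count ans lenw hc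
    simp only [goB, innerA, if_neg hc]
    have hL : (if c = w then goB tl w (count + 1) ans else goB tl w (count - 1) ans)
        = goB tl w (if c = w then count + 1 else count - 1) ans := by
      split <;> rfl
    rw [hL]
    generalize (if c = w then count + 1 else count - 1) = k
    by_cases h0 : k = 0
    · rw [if_pos h0, h0]
    · rw [if_neg h0]
      by_cases hl : lenw + 1 ≥ lenw + ((c :: tl).length : Int)
      · rw [if_pos hl]
        have htl : tl = [] := by
          cases tl with
          | nil => rfl
          | cons d td => exfalso; simp [List.length_cons] at hl; omega
        subst htl
        simp [goB]
      · rw [if_neg hl]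
        have htot : lenw + (((c :: tl).length : Int)) = (lenw + 1) + (tl.length : Int) := by
          push_cast [List.length_cons]; ring
        rw [htot]
        exact ih w k ans (lenw + 1) h0

-- the two loops agree from the initial state, by strong induction on the length
theorem goA_eq_goB_aux : ∀ (n : Nat) (l : List Char), l.length ≤ n → goA l = goB l ' ' 0 0 := by
  intro n
  induction n with
  | zero =>
    intro l hl
    have h0 : l = [] := List.length_eq_zero_iff.mp (Nat.le_zero.mp hl)
    subst h0
    simp [goA, goB]
  | succ n ih =>
    intro l hl
    cases l with
    | nil => simp [goA, goB]
    | cons c tl =>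
      cases tl with
      | nil =>
        have h1 : innerA c [c] 0 0 (([c].length : Nat) : Int) = none := by simp [innerA]
        rw [goA]
        split
        next r h => exact absurd (h.symm.trans h1) (by simp)
        next h => simp [goB]
      | cons d td =>
        have h2 : ¬ ((0 : Int) + 1 ≥ (((c :: d :: td).length : Nat) : Int)) := by
          push_cast [List.length_cons]; omega
        have hstep : innerA c (c :: d :: td) 0 0 (((c :: d :: td).length : Nat) : Int)
            = innerA c (d :: td) 1 1 (((c :: d :: td).length : Nat) : Int) := by
          rw [innerA, if_neg (by simp : ¬ ((if c = c then (0 : Int) + 1 else 0 - 1) = 0)),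
            if_neg h2]
          simp
        have htot : (((c :: d :: td).length : Nat) : Int) = 1 + ((d :: td).length : Int) := by
          push_cast [List.length_cons]; ring
        have hRHS : goB (c :: d :: td) ' ' 0 0 = goB (d :: td) c 1 1 := by simp [goB]
        rw [hRHS, goB_inner (d :: td) c 1 1 1 (by norm_num), ← htot, ← hstep, goA]
        split
        next r h =>
          rw [h]
          have hres' : innerA c (d :: td) 1 1 (((c :: d :: td).length : Nat) : Int) = some r :=
            hstep.symm.trans h
          have hr : r.length < (d :: td).length := innerA_some_lt _ _ _ _ _ _ hres'
          have hrn : r.length ≤ n := by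
            simp [List.length_cons] at hl hr; omega
          show 1 + goA r = goB r c 0 1
          rw [goB_shift r c 0 1, goB_head0 r c ' ' 0, ← ih r hrn]
        next h =>
          rw [h]

-- ===== VERDICT (by name: the statement is the Claim_ definition above) =====
theorem solution_spec : Claim_equal_solution := by
  intro s _
  unfold Spec_solution solution solution_alt
  exact goA_eq_goB_aux s.toList.length s.toList le_rfl
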